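-- pv_equiv track=rewrite | github.com/owbear/aoc_2017 | ac_06.py | calc_steps_06a
-- ===== SOURCE A (Python) =====
-- import itertools
--
-- def calc_steps_06a(data: list):
--     seen = {}
--     iterations = 0
--     while tuple(data) not in seen:
--         iterations += 1
--         seen[tuple(data)] = iterations
--
--         value = max(data)
--         position = data.index(value)
--         data[position] = 0
--
--         tail = range(position, len(data))
--         head = range(0, position)
--
--         indexes = itertools.cycle(itertools.chain(tail, head))
--         next(indexes)
--         for n, i in zip(range(value), indexes):
--             data[i] += 1
--             if n == value:
--                 break
--
--     return data, iterations, iterations-seen[tuple(data)]+1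
-- ===== SOURCE B (Python) =====
-- def calc_steps_06a(data: list):
--     # Equivalence is about the return value; like A, this mutates `data` in place.
--     seen = {}
--     n = len(data)
--     count = 1
--     while True:
--         key = tuple(data)
--         if key in seen:
--             return data, count - 1, count - seen[key]
--         seen[key] = count
--         count += 1
--         value = max(data)
--         position = data.index(value)
--         data[position] = 0
--         if value > 0:
--             q, r = divmod(value, n)
--             if q:
--                 for i in range(n):
--                     data[i] += q
--             start = position + 1
--             end = start + r
--             if end <= n:
--                 for i in range(start, end):
--                     data[i] += 1
--             else:
--                 for i in range(start, n):
--                     data[i] += 1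
--                 for i in range(end - n):
--                     data[i] += 1
-- ===== Notes on version B (the rewrite author's own statement) =====
-- stated objective: alternative
-- what changed: A pushes the chosen bank's value around one unit at a time through itertools.cycle/chain/zip; B computes each bank's share arithmetically with one divmod and applies it as at most three contiguous block updates (a +q pass over all banks, skipped when q==0, and a +1 window of r banks that may wrap), keeping the same seen-dict cycle detection.
import Mathlib
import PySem

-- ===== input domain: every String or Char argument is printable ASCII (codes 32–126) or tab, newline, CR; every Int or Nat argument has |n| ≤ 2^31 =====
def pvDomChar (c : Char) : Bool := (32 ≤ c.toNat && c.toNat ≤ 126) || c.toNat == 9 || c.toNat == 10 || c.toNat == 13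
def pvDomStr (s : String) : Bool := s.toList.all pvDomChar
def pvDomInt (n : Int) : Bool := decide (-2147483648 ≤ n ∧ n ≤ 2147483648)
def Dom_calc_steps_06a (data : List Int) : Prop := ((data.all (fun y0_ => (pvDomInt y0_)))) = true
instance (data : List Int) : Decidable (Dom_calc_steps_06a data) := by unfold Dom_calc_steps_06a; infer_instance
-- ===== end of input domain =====

-- B replaces A's one-unit-at-a-time itertools.cycle redistribution by a divmod computation applied
-- as contiguous block updates (an everyone-gets-q pass plus a +1 window); the return value is identical.
-- Both Pythons mutate `data` in place and return it; the equivalence proved is about the return value.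

-- Fuel guard shared by both ports, making the identical while/for-ever loops total; on exhaustion
-- both ports return the same fallback tuple, so the equivalence claim is unaffected by the guard.
def pvFuel (data : List Int) : Nat :=
  (3 * data.foldl (fun a x => a + x.natAbs) 0 + data.length + 4) ^ (data.length + 1) + 3

-- ===== PORT A =====
-- data[i] += 1
def pvIncAt (d : List Int) (i : Int) : List Int :=
  PySem.List.pySetD d i (PySem.List.pyGetD d i 0 + 1)

-- A's inner loop `for n, i in zip(range(value), indexes)`: after the initial next(),
-- itertools.cycle(itertools.chain(tail, head)) yields at step k exactly the index
-- (position + 1 + k) mod len(data); the guard `if n == value: break` never fires (n < value).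
def pvStepA (d : List Int) (p : Nat) (v : Int) : List Int :=
  (PySem.List.pyRange 0 v 1).foldl
    (fun acc k => pvIncAt acc (PySem.Int.mod ((p : Int) + 1 + k) (d.length : Int))) d

def pvGoA (fuel : Nat) (data : List Int) (seen : PySem.Dict (List Int) Int) (iterations : Int) :
    List Int × Int × Int :=
  match fuel with
  | 0 => (data, iterations, 0)  -- shared fuel-exhaustion fallback
  | fuel + 1 =>
    match seen.get? data with   -- `while tuple(data) not in seen` / final `seen[tuple(data)]`
    | some first => (data, iterations, iterations - first + 1)
    | none =>
      let iterations := iterations + 1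
      let seen := seen.insert data iterations
      let value := (PySem.List.max? data (fun x => x)).getD 0      -- max(data); [] excluded by Pre_
      let position := (PySem.List.index? data value).getD 0        -- data.index(value)
      let data1 := PySem.List.pySetD data (position : Int) 0       -- data[position] = 0
      pvGoA fuel (pvStepA data1 position value) seen iterations

def calc_steps_06a (data : List Int) : List Int × Int × Int :=
  pvGoA (pvFuel data) data PySem.Dict.empty 0

-- ===== PORT B =====
-- B's inner update: q, r = divmod(value, n); an n-pass adding q (skipped when q == 0),
-- then +1 on the cyclic window of r banks after `position`, as one or two contiguous loops.
def pvStepB (d : List Int) (p : Nat) (v : Int) : List Int :=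
  let n : Int := (d.length : Int)
  let q := PySem.Int.floordiv v n
  let r := PySem.Int.mod v n
  let d1 := if q ≠ 0 then
      (PySem.List.pyRange 0 n).foldl
        (fun acc i => PySem.List.pySetD acc i (PySem.List.pyGetD acc i 0 + q)) d
    else d
  let start : Int := (p : Int) + 1
  let stop := start + r
  if stop ≤ n then
    (PySem.List.pyRange start stop).foldl
      (fun acc i => PySem.List.pySetD acc i (PySem.List.pyGetD acc i 0 + 1)) d1
  else
    let d2 := (PySem.List.pyRange start n).foldl
      (fun acc i => PySem.List.pySetD acc i (PySem.List.pyGetD acc i 0 + 1)) d1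
    (PySem.List.pyRange 0 (stop - n)).foldl
      (fun acc i => PySem.List.pySetD acc i (PySem.List.pyGetD acc i 0 + 1)) d2

def pvGoB (fuel : Nat) (data : List Int) (seen : PySem.Dict (List Int) Int) (count : Int) :
    List Int × Int × Int :=
  match fuel with
  | 0 => (data, count - 1, 0)  -- shared fuel-exhaustion fallback
  | fuel + 1 =>
    match seen.get? data with   -- `if key in seen: return …` / `seen[key] = count`
    | some first => (data, count - 1, count - first)
    | none =>
      let seen := seen.insert data count
      let value := (PySem.List.max? data (fun x => x)).getD 0
      let position := (PySem.List.index? data value).getD 0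
      let data1 := PySem.List.pySetD data (position : Int) 0
      let data2 := if 0 < value then pvStepB data1 position value else data1
      pvGoB fuel data2 seen (count + 1)

def calc_steps_06a_alt (data : List Int) : List Int × Int × Int :=
  pvGoB (pvFuel data) data PySem.Dict.empty 1

-- ===== PRECONDITION & SPEC =====
-- Pre_ excludes only the empty list, on which Python A raises ValueError (max of empty sequence).
def Pre_calc_steps_06a (data : List Int) : Prop := data ≠ []
instance (data : List Int) : Decidable (Pre_calc_steps_06a data) := by
  unfold Pre_calc_steps_06a; infer_instance

def pvWitness_calc_steps_06a : List Int := [0, 2, 7, 0]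

def Spec_calc_steps_06a (data : List Int) (out : List Int × Int × Int) : Prop := out = calc_steps_06a_alt data
instance (data : List Int) (out : List Int × Int × Int) : Decidable (Spec_calc_steps_06a data out) := by unfold Spec_calc_steps_06a; infer_instance

-- ===== CLAIM (what is proved, stated in full; the proofs are below) =====
def Claim_equal_calc_steps_06a : Prop := ∀ (data : List Int), Dom_calc_steps_06a data → Pre_calc_steps_06a data → Spec_calc_steps_06a data (calc_steps_06a data)

-- ===== LEMMAS AND PROOFS =====

theorem pvFoldl_length_pres {β : Type} (f : List Int → β → List Int)
    (hf : ∀ a k, (f a k).length = a.length) :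
    ∀ (l : List β) (acc : List Int), (l.foldl f acc).length = acc.length := by
  intro l
  induction l with
  | nil => intro acc; rfl
  | cons k l ih => intro acc; simp [List.foldl_cons, ih, hf]

theorem pvStepB_length (d : List Int) (p : Nat) (v : Int) :
    (pvStepB d p v).length = d.length := by
  unfold pvStepB
  dsimp only
  split_ifs <;>
    simp only [pvFoldl_length_pres _ (fun a (k : Int) => PySem.List.length_pySetD a k _)]

-- counting k < m with k % n = c
theorem pvCountMod (n c : Nat) (hn : 0 < n) (hc : c < n) :
    ∀ m : Nat, ((List.range m).filter (fun k => k % n = c)).length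
      = m / n + (if c < m % n then 1 else 0) := by
  intro m
  induction m with
  | zero =>
    simp
  | succ m ih =>
    rw [List.range_succ, List.filter_append, List.length_append, ih]
    have hb : m % n < n := Nat.mod_lt _ hn
    have hdm := Nat.div_add_mod m n
    by_cases hdv : m % n + 1 = n
    · have hdvd : n ∣ m + 1 := ⟨m / n + 1, by rw [Nat.mul_add, Nat.mul_one]; omega⟩
      have h1 : (m + 1) / n = m / n + 1 := by rw [Nat.succ_div, if_pos hdvd]
      have h2 : (m + 1) % n = 0 := Nat.mod_eq_zero_of_dvd hdvd
      rw [h1, h2]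
      by_cases hcm : m % n = c <;> simp [hcm] <;> (try split_ifs) <;> omega
    · have h2 : (m + 1) % n = m % n + 1 := by
        conv_lhs => rw [← hdm]
        rw [Nat.add_assoc, Nat.mul_add_mod]
        exact Nat.mod_eq_of_lt (by omega)
      have hndvd : ¬ n ∣ m + 1 := by
        intro h
        have h0 : (m + 1) % n = 0 := Nat.mod_eq_zero_of_dvd h
        omega
      have h1 : (m + 1) / n = m / n := by simp [Nat.succ_div, hndvd]
      rw [h1, h2]
      by_cases hcm : m % n = c <;> simp [hcm] <;> (try split_ifs) <;> omega

theorem pvGetD_set (a : List Int) (i j : Nat) (v : Int) (hi : i < a.length) :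
    (a.set i v).getD j 0 = if i = j then v else a.getD j 0 := by
  simp only [List.getD, List.getElem?_set]
  by_cases h : i = j
  · subst h; simp [hi]
  · simp [h]

theorem pvFoldl_inc_getD (g : Nat → Nat) :
    ∀ (l : List Nat) (acc : List Int), (∀ k ∈ l, g k < acc.length) → ∀ j : Nat,
      (l.foldl (fun a k => a.set (g k) (a.getD (g k) 0 + 1)) acc).getD j 0
        = acc.getD j 0 + ((l.filter (fun k => g k = j)).length : Int) := by
  intro l
  induction l with
  | nil => intro acc _ j; simp
  | cons k l ih =>
    intro acc hlen j
    rw [List.foldl_cons, ih _ (fun x hx => by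
      rw [List.length_set]; exact hlen x (List.mem_cons_of_mem _ hx)),
      pvGetD_set _ _ _ _ (hlen k (List.mem_cons_self))]
    by_cases h : g k = j <;> simp [h, List.filter_cons] <;> ring

theorem pvFoldl_setAdd_getD (h : Nat → Int) :
    ∀ (l : List Nat) (acc : List Int), l.Nodup → (∀ i ∈ l, i < acc.length) → ∀ j : Nat,
      (l.foldl (fun a k => a.set k (a.getD k 0 + h k)) acc).getD j 0
        = acc.getD j 0 + (if j ∈ l then h j else 0) := by
  intro l
  induction l with
  | nil => intro acc _ _ j; simp
  | cons k l ih =>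
    intro acc hnd hlen j
    rw [List.foldl_cons, ih _ (List.nodup_cons.mp hnd).2 (fun x hx => by
      rw [List.length_set]; exact hlen x (List.mem_cons_of_mem _ hx)),
      pvGetD_set _ _ _ _ (hlen k (List.mem_cons_self))]
    have hk : k ∉ l := (List.nodup_cons.mp hnd).1
    by_cases hjk : k = j
    · subst hjk
      simp [hk]
    · by_cases hjl : j ∈ l <;> simp [hjk, hjl] <;>
        exact fun e => absurd e.symm hjk

theorem pvPredEquiv (n p j k : Nat) (hn : 0 < n) (hj : j < n) :
    ((p + 1 + k) % n = j) ↔ (k % n = (((j:Int) - ↑p - 1) % (n:Int)).toNat) := by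
  have hc0 : (0:Int) ≤ ((j:Int) - ↑p - 1) % (n:Int) := Int.emod_nonneg _ (by omega)
  have hcast : ((((j:Int) - ↑p - 1) % (n:Int)).toNat : Int) = ((j:Int) - ↑p - 1) % (n:Int) :=
    Int.toNat_of_nonneg hc0
  have hL : ((p + 1 + k) % n = j) ↔ (((p + 1 + k : Nat):Int) % ↑n = (j:Int) % ↑n) := by
    rw [Int.emod_eq_of_lt (a := (j:Int)) (by positivity) (by exact_mod_cast hj), ← Int.natCast_mod]
    exact Nat.cast_inj.symm
  have hR : (k % n = (((j:Int) - ↑p - 1) % (n:Int)).toNat) ↔ ((k:Int) % ↑n = ((j:Int) - ↑p - 1) % ↑n) := by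
    rw [← hcast, ← Int.natCast_mod]
    exact Nat.cast_inj.symm
  rw [hL, hR, Int.emod_eq_emod_iff_emod_sub_eq_zero, Int.emod_eq_emod_iff_emod_sub_eq_zero]
  have heq : ((p + 1 + k : Nat):Int) - ↑j = (k:Int) - ((j:Int) - ↑p - 1) := by push_cast; ring
  rw [heq]

theorem pvRangeAdd_eq (aN bN : Nat) (w : Int) (d : List Int) :
    (PySem.List.pyRange (aN : Int) (bN : Int)).foldl
        (fun acc i => PySem.List.pySetD acc i (PySem.List.pyGetD acc i 0 + w)) d
      = (List.range (bN - aN)).foldl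
        (fun a k => a.set (aN + k) (a.getD (aN + k) 0 + w)) d := by
  rw [PySem.List.pyRange_one]
  have h0 : ((bN : Int) - (aN : Int)).toNat = bN - aN := by omega
  rw [h0, List.foldl_map]
  refine PySem.List.foldl_congr_mem _ _ _ _ ?_
  intro a k _
  rw [show ((aN:Int) + (k:Int)) = ((aN + k : Nat) : Int) by push_cast; ring]
  rw [PySem.List.pySetD_natCast, PySem.List.pyGetD_natCast]

theorem pvBlockAdd_getD (aN cnt : Nat) (w : Int) (acc : List Int)
    (hin : aN + cnt ≤ acc.length) (j : Nat) :
    ((List.range cnt).foldl (fun a k => a.set (aN + k) (a.getD (aN + k) 0 + w)) acc).getD j 0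
      = acc.getD j 0 + (if aN ≤ j ∧ j < aN + cnt then w else 0) := by
  have hfold : (List.range cnt).foldl (fun a k => a.set (aN + k) (a.getD (aN + k) 0 + w)) acc
      = ((List.range cnt).map (fun k => aN + k)).foldl (fun a k => a.set k (a.getD k 0 + w)) acc := by
    rw [List.foldl_map]
  have hnd : ((List.range cnt).map (fun k => aN + k)).Nodup :=
    List.Nodup.map (fun x y h => by omega) List.nodup_range
  have hlen : ∀ i ∈ (List.range cnt).map (fun k => aN + k), i < acc.length := by
    intro i hi
    simp only [List.mem_map, List.mem_range] at hi
    obtain ⟨k, hk, rfl⟩ := hi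
    omega
  rw [hfold, pvFoldl_setAdd_getD (fun _ => w) _ acc hnd hlen j]
  have hmem : (j ∈ (List.range cnt).map (fun k => aN + k)) ↔ (aN ≤ j ∧ j < aN + cnt) := by
    simp only [List.mem_map, List.mem_range]
    constructor
    · rintro ⟨k, hk, rfl⟩; omega
    · intro h; exact ⟨j - aN, by omega, by omega⟩
  simp only [hmem]

theorem pvEmodChar (x c n : Int) (hn : 0 < n) (h0 : 0 ≤ c) (h1 : c < n) (hd : n ∣ x - c) :
    x % n = c := by
  have h : x % n = c % n := by
    rw [Int.emod_eq_emod_iff_emod_sub_eq_zero]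
    exact Int.emod_eq_zero_of_dvd hd
  rw [h, Int.emod_eq_of_lt h0 h1]

theorem pvCN_char (n p j : Nat) (hn : 0 < n) (hp : p < n) (hj : j < n) :
    (((j:Int) - ↑p - 1) % (n:Int)).toNat
      = if p + 1 ≤ j then j - (p + 1) else j + n - (p + 1) := by
  by_cases h : p + 1 ≤ j
  · rw [if_pos h]
    have he : ((j:Int) - ↑p - 1) % (n:Int) = ((j - (p + 1) : Nat) : Int) := by
      refine pvEmodChar _ _ _ (by exact_mod_cast hn) (by positivity) (by
        have : j - (p + 1) < n := by omega
        exact_mod_cast this) ⟨0, by rw [Nat.cast_sub h]; push_cast; ring⟩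
    rw [he, Int.toNat_natCast]
  · rw [if_neg h]
    have he : ((j:Int) - ↑p - 1) % (n:Int) = ((j + n - (p + 1) : Nat) : Int) := by
      refine pvEmodChar _ _ _ (by exact_mod_cast hn) (by positivity) (by
        have : j + n - (p + 1) < n := by omega
        exact_mod_cast this) ⟨-1, by rw [Nat.cast_sub (by omega : p + 1 ≤ j + n)]; push_cast; ring⟩
    rw [he, Int.toNat_natCast]

theorem pvStep_eq (d : List Int) (p : Nat) (hp : p < d.length) (v : Int) :
    pvStepA d p v = if 0 < v then pvStepB d p v else d := by
  by_cases hv : 0 < v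
  case neg =>
    rw [if_neg hv]
    unfold pvStepA
    rw [PySem.List.pyRange_one]
    have h0 : (v - 0).toNat = 0 := by omega
    rw [h0]
    rfl
  case pos =>
  rw [if_pos hv]
  have hn0 : 0 < d.length := Nat.lt_of_le_of_lt (Nat.zero_le p) hp
  have hnz : (0:Int) < (d.length : Int) := by exact_mod_cast hn0
  set n := d.length with hndef
  set m := v.toNat with hmdef
  have hmv : (m : Int) = v := Int.toNat_of_nonneg (le_of_lt hv)
  have hA : pvStepA d p v = List.foldl
      (fun a k => a.set ((p + 1 + k) % n) (a.getD ((p + 1 + k) % n) 0 + 1)) d (List.range m) := by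
    unfold pvStepA
    rw [PySem.List.pyRange_one]
    have h0 : (v - 0).toNat = m := by omega
    rw [h0, List.foldl_map]
    refine PySem.List.foldl_congr_mem _ _ _ _ ?_
    intro a k _
    have hidx : PySem.Int.mod ((p:Int) + 1 + ((0:Int) + (k:Int))) ((n : Nat) : Int)
        = (((p + 1 + k) % n : Nat) : Int) := by
      rw [PySem.Int.mod_eq_emod_of_pos hnz]
      push_cast
      ring_nf
    rw [hidx]
    unfold pvIncAt
    rw [PySem.List.pySetD_natCast, PySem.List.pyGetD_natCast]
  -- pointwise value of B's update
  have hBpt : ∀ j : Nat, j < n → (pvStepB d p v).getD j 0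
      = d.getD j 0 + (((m / n : Nat) : Int) +
          if (((j:Int) - ↑p - 1) % (n:Int)).toNat < m % n then 1 else 0) := by
    intro j hj
    unfold pvStepB
    dsimp only
    rw [← hndef]
    rw [← hmv, PySem.Int.floordiv_natCast, PySem.Int.mod_natCast]
    rw [show ((p:Int) + 1) = ((p + 1 : Nat) : Int) by push_cast; ring]
    rw [show ((p + 1 : Nat) : Int) + ((m % n : Nat) : Int) = ((p + 1 + m % n : Nat) : Int) by
      push_cast; ring]
    have hr : m % n < n := Nat.mod_lt _ hn0
    have hd1 : ∀ dd : List Int, dd =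
        (if ((m / n : Nat) : Int) ≠ 0 then
          (PySem.List.pyRange 0 ((n : Nat) : Int)).foldl
            (fun acc i => PySem.List.pySetD acc i (PySem.List.pyGetD acc i 0 + ((m / n : Nat) : Int))) d
        else d) →
        dd.length = n ∧ dd.getD j 0 = d.getD j 0 + ((m / n : Nat) : Int) := by
      intro dd hdd
      subst hdd
      split_ifs with hq
      · have h00 := pvRangeAdd_eq 0 n ((m / n : Nat) : Int) d
        rw [Nat.cast_zero] at h00
        constructor
        · rw [h00]
          exact pvFoldl_length_pres _ (fun a k => List.length_set ..) _ d
        · rw [h00, pvBlockAdd_getD 0 (n - 0) _ d (by omega) j, if_pos (by omega)]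
      · constructor
        · rfl
        · have : ((m / n : Nat) : Int) = 0 := by omega
          rw [this, add_zero]
    obtain ⟨hd1len, hd1val⟩ := hd1 _ rfl
    set d1 := (if ((m / n : Nat) : Int) ≠ 0 then
          (PySem.List.pyRange 0 ((n : Nat) : Int)).foldl
            (fun acc i => PySem.List.pySetD acc i (PySem.List.pyGetD acc i 0 + ((m / n : Nat) : Int))) d
        else d) with hd1def
    rw [pvCN_char n p j hn0 (by omega) hj]
    by_cases hstopN : p + 1 + m % n ≤ n
    · rw [if_pos (show ((p + 1 + m % n : Nat) : Int) ≤ ((n : Nat) : Int) by exact_mod_cast hstopN)]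
      rw [pvRangeAdd_eq (p + 1) (p + 1 + m % n) 1 d1,
          pvBlockAdd_getD (p + 1) ((p + 1 + m % n) - (p + 1)) 1 d1 (by omega) j, hd1val]
      split_ifs <;> omega
    · rw [if_neg (show ¬ ((p + 1 + m % n : Nat) : Int) ≤ ((n : Nat) : Int) by exact_mod_cast hstopN)]
      rw [show ((p + 1 + m % n : Nat) : Int) - ((n : Nat) : Int)
            = ((p + 1 + m % n - n : Nat) : Int) by omega]
      have h2 := pvRangeAdd_eq 0 (p + 1 + m % n - n) 1
        ((PySem.List.pyRange ((p + 1 : Nat) : Int) ((n : Nat) : Int)).foldl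
          (fun acc i => PySem.List.pySetD acc i (PySem.List.pyGetD acc i 0 + 1)) d1)
      rw [Nat.cast_zero] at h2
      rw [h2, pvRangeAdd_eq (p + 1) n 1 d1]
      have hlen2 : ((List.range (n - (p + 1))).foldl
          (fun a k => a.set (p + 1 + k) (a.getD (p + 1 + k) 0 + 1)) d1).length = n := by
        rw [pvFoldl_length_pres _ (fun a k => List.length_set ..) _ d1]
        exact hd1len
      rw [pvBlockAdd_getD 0 ((p + 1 + m % n - n) - 0) 1 _ (by omega) j,
          pvBlockAdd_getD (p + 1) (n - (p + 1)) 1 d1 (by omega) j, hd1val]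
      split_ifs <;> omega
  have hAlen : (List.foldl
      (fun a k => a.set ((p + 1 + k) % n) (a.getD ((p + 1 + k) % n) 0 + 1)) d (List.range m)).length
      = d.length := pvFoldl_length_pres _ (fun a k => List.length_set ..) _ d
  apply List.ext_getElem
  · rw [hA, hAlen, pvStepB_length]
  · intro j hj1 hj2
    have hjd : j < n := by
      rw [hA, hAlen] at hj1
      exact hj1
    rw [← List.getD_eq_getElem _ 0 hj1, ← List.getD_eq_getElem _ 0 hj2]
    rw [hA, pvFoldl_inc_getD (fun k => (p + 1 + k) % n) (List.range m) d
          (fun k _ => Nat.mod_lt _ hn0) j,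
        hBpt j hjd]
    congr 1
    set cN := (((j:Int) - ↑p - 1) % (n:Int)).toNat with hcN
    have hcn : cN < n := by
      have h1 : (0:Int) ≤ ((j:Int) - ↑p - 1) % (n:Int) := Int.emod_nonneg _ (by omega)
      have h2 := Int.emod_lt_of_pos ((j:Int) - ↑p - 1) hnz
      omega
    have hfilter : (List.range m).filter (fun k => decide ((p + 1 + k) % n = j))
        = (List.range m).filter (fun k => decide (k % n = cN)) := by
      refine List.filter_congr ?_
      intro k _
      exact decide_eq_decide.mpr (pvPredEquiv n p j k hn0 hjd)
    rw [hfilter, pvCountMod n cN hn0 hcn m]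
    by_cases hcc : cN < m % n
    · rw [if_pos hcc, if_pos hcc]
      push_cast
      ring
    · rw [if_neg hcc, if_neg hcc]
      push_cast
      ring

theorem pvGo_eq (fuel : Nat) :
    ∀ (data : List Int) (seen : PySem.Dict (List Int) Int) (c : Int),
      data ≠ [] → pvGoA fuel data seen c = pvGoB fuel data seen (c + 1) := by
  induction fuel with
  | zero =>
    intro data seen c _
    unfold pvGoA pvGoB
    simp
  | succ fuel ih =>
    intro data seen c hne
    unfold pvGoA pvGoB
    cases hsee : PySem.Dict.get? seen data with
    | some first =>
      simp only [hsee, Prod.mk.injEq, true_and]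
      exact ⟨by ring, by ring⟩
    | none =>
      simp only [hsee]
      obtain ⟨val, hval⟩ : ∃ val, PySem.List.max? data (fun x => x) = some val := by
        cases h : PySem.List.max? data (fun x => x) with
        | none => exact absurd ((PySem.List.max?_eq_none_iff _ _).mp h) hne
        | some val => exact ⟨val, rfl⟩
      have hmem : val ∈ data := PySem.List.max?_mem hval
      obtain ⟨pos, hpos⟩ : ∃ pos, PySem.List.index? data val = some pos := by
        have hs := (PySem.List.index?_isSome_iff data val).mpr hmem
        cases h : PySem.List.index? data val with
        | none => rw [h] at hs; simp at hs
        | some pos => exact ⟨pos, rfl⟩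
      obtain ⟨hplt, -, -⟩ := PySem.List.getElem_of_index?_eq_some hpos
      rw [hval]
      simp only [Option.getD_some]
      rw [hpos]
      simp only [Option.getD_some, PySem.List.pySetD_natCast]
      have hplt1 : pos < (data.set pos 0).length := by
        rw [List.length_set]; exact hplt
      rw [pvStep_eq _ _ hplt1 val]
      apply ih
      have hlen : (if 0 < val then pvStepB (data.set pos 0) pos val else data.set pos 0).length
          = data.length := by
        split_ifs
        · rw [pvStepB_length, List.length_set]
        · rw [List.length_set]
      have hpos' : 0 < data.length := List.length_pos_of_ne_nil hne
      intro hnil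
      rw [hnil] at hlen
      simp at hlen
      omega

-- ===== VERDICT (by name: the statement is the Claim_ definition above) =====
theorem calc_steps_06a_spec : Claim_equal_calc_steps_06a := by
  intro data _ hpre
  unfold Spec_calc_steps_06a calc_steps_06a calc_steps_06a_alt
  have := pvGo_eq (pvFuel data) data PySem.Dict.empty 0 hpre
  simpa using this
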